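-- pv_equiv track=rewrite | github.com/romi2410/natural_language_processing | Brills_PartOfSpeech_Tagging/brillsTagging.py | selectMostLikely
-- ===== SOURCE A (Python) =====
-- from collections import Counter
--
-- def selectMostLikely(words, tags):
--     wordTagDict = {}
--
--     for i in range(len(words)):
--         if not words[i] in wordTagDict:
--             wordTagDict[words[i]] = [tags[i]]
--         else:
--             wordTagDict[words[i]].append(tags[i])
--
--     for key, value in wordTagDict.items():
--         mostLikely = Counter(value).most_common()[0][0]
--         wordTagDict[key] = mostLikely
--
--     finWordTag = []
--     for word in words:
--         finWordTag.append(wordTagDict[word])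
--
--     return finWordTag
-- ===== SOURCE B (Python) =====
-- from collections import Counter
--
-- def selectMostLikely(words, tags):
--     pairs = list(zip(words, tags))
--     counts = Counter(pairs)
--     best = {}
--     bestCount = {}
--     for (w, t), c in counts.items():
--         if c > bestCount.get(w, 0):
--             bestCount[w] = c
--             best[w] = t
--     return [best[w] for w in words]
-- ===== Notes on version B (the rewrite author's own statement) =====
-- stated objective: alternative
-- what changed: Instead of grouping tags into per-word lists and running a Counter+most_common sort for every word, B counts (word,tag) pairs in one flat Counter and picks each word's winner in a single strict-argmax pass over the distinct pairs (strict > keeps the first-occurrence tie-break), then maps words through the result; dropping the per-word list building and per-word sorts is a constant-factor win.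
-- outside the precondition, e.g. on selectMostLikely(['a'], []): A raises IndexError, B raises KeyError
import Mathlib
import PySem

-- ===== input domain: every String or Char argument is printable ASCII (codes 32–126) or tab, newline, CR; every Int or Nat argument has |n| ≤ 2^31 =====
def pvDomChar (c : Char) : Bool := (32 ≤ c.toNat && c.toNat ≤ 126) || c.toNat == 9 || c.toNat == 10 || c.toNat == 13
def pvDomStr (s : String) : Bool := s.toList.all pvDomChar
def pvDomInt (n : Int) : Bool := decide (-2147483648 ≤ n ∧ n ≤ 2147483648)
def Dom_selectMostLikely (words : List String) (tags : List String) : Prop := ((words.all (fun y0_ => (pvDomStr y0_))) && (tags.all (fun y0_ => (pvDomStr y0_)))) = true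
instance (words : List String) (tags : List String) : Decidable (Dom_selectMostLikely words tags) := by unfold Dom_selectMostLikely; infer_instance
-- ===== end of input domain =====

-- B replaces A's per-word tag lists + per-word Counter().most_common() sort by one flat
-- Counter over (word,tag) pairs and a single strict-argmax pass over its distinct items
-- (objective: alternative decomposition; same results, first-occurrence tie-break preserved).

-- ===== PORT A =====
-- 'Counter(value).most_common()[0][0]': most_common() is a stable sort of the counter's
-- items by count, reverse=True; '[0][0]' on the (always nonempty) list is headD's .1.
def pvMostCommonTag (v : List String) : String :=
  ((PySem.List.sorted (PySem.Dict.counter v).items (fun p => p.2) true).headD ("", 0)).1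

def selectMostLikely (words : List String) (tags : List String) : List String :=
  -- for i in range(len(words)): append tags[i] to wordTagDict[words[i]] (IndexError on
  -- tags[i] when tags is shorter: that branch is outside Pre_ and leaves the dict unchanged)
  let wtd : PySem.Dict String (List String) :=
    (PySem.List.pyRange 0 (words.length : Int) 1).foldl
      (fun d i =>
        match PySem.List.pyGet? words i, PySem.List.pyGet? tags i with
        | some w, some t =>
          match d.get? w with
          | none => d.insert w [t]
          | some v => d.insert w (v ++ [t])
        | _, _ => d)
      PySem.Dict.empty
  -- for key, value in wordTagDict.items(): wordTagDict[key] = mostLikely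
  -- (overwriting every existing key in place = mapping the items list)
  let wtd2 : PySem.Dict String String :=
    PySem.Dict.mk (wtd.items.map (fun kv => (kv.1, pvMostCommonTag kv.2)))
  -- finWordTag loop ('wordTagDict[word]' never misses inside Pre_, so getD is exact there)
  words.foldl (fun acc w => acc ++ [wtd2.getD w ""]) []

-- ===== PORT B =====
def selectMostLikely_alt (words : List String) (tags : List String) : List String :=
  let pairs := words.zip tags
  let counts := PySem.Dict.counter pairs
  -- for (w, t), c in counts.items(): if c > bestCount.get(w, 0): update both dicts
  let st :=
    counts.items.foldl
      (fun (st : PySem.Dict String String × PySem.Dict String Int) kv =>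
        if kv.2 > st.2.getD kv.1.1 0 then
          (st.1.insert kv.1.1 kv.1.2, st.2.insert kv.1.1 kv.2)
        else st)
      (PySem.Dict.empty, PySem.Dict.empty)
  -- [best[w] for w in words]  ('best[w]' never misses inside Pre_, so getD is exact there)
  words.map (fun w => st.1.getD w "")

-- ===== PRECONDITION & SPEC =====
-- A evaluates tags[i] for every i < len(words): it raises IndexError iff len(tags) < len(words).
def Pre_selectMostLikely (words : List String) (tags : List String) : Prop :=
  words.length ≤ tags.length
instance (words : List String) (tags : List String) : Decidable (Pre_selectMostLikely words tags) := by unfold Pre_selectMostLikely; infer_instance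
def pvWitness_selectMostLikely : List String × List String := (["a", "b", "a"], ["N", "V", "N"])

def Spec_selectMostLikely (words : List String) (tags : List String) (out : List String) : Prop := out = selectMostLikely_alt words tags
instance (words : List String) (tags : List String) (out : List String) : Decidable (Spec_selectMostLikely words tags out) := by unfold Spec_selectMostLikely; infer_instance

-- ===== CLAIM (what is proved, stated in full; the proofs are below) =====
def Claim_equal_selectMostLikely : Prop := ∀ (words : List String) (tags : List String), Dom_selectMostLikely words tags → Pre_selectMostLikely words tags → Spec_selectMostLikely words tags (selectMostLikely words tags)

-- ===== LEMMAS AND PROOFS =====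

-- the tags grouped under word w, in order
def pvGroup (L : List (String × String)) (w : String) : List String :=
  (L.filter (fun p => p.1 == w)).map (·.2)


-- A's first-loop body as a function of the pair (words[i], tags[i])
def pvStepA (d : PySem.Dict String (List String)) (p : String × String) : PySem.Dict String (List String) :=
  match d.get? p.1 with
  | none => d.insert p.1 [p.2]
  | some v => d.insert p.1 (v ++ [p.2])

-- B's loop body on the state (best, bestCount)
def pvStepB (st : PySem.Dict String String × PySem.Dict String Int)
    (kv : (String × String) × Int) : PySem.Dict String String × PySem.Dict String Int :=
  if kv.2 > st.2.getD kv.1.1 0 then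
    (st.1.insert kv.1.1 kv.1.2, st.2.insert kv.1.1 kv.2)
  else st

-- running strict argmax, Option-state form (B, per word) and seeded form (A, per word)
def pvRun (l : List (String × Int)) (st : Option String × Int) : Option String × Int :=
  l.foldl (fun st x => if x.2 > st.2 then (some x.1, x.2) else st) st

def pvRunH (l : List (String × Int)) (h : String × Int) : String × Int :=
  l.foldl (fun h x => if x.2 > h.2 then x else h) h

theorem pvFoldRangeAux {a : Type} (ws ts : List String) (f : a -> String × String -> a)
    (h : ws.length ≤ ts.length) :
    ∀ (m k : Nat), m = ws.length - k →
    ∀ (init : a),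
      (PySem.List.pyRange (k : Int) (ws.length : Int) 1).foldl
        (fun d i =>
          match PySem.List.pyGet? ws i, PySem.List.pyGet? ts i with
          | some w, some t => f d (w, t)
          | _, _ => d) init
      = ((ws.drop k).zip (ts.drop k)).foldl f init := by
  intro m
  induction m with
  | zero =>
    intro k hk init
    have hge : ws.length ≤ k := by omega
    rw [PySem.List.pyRange_one_eq_nil (by exact_mod_cast hge),
        List.drop_eq_nil_of_le hge]
    rfl
  | succ m ih =>
    intro k hk init
    have hklt : k < ws.length := by omega
    have hkt : k < ts.length := lt_of_lt_of_le hklt h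
    rw [PySem.List.pyRange_one_cons (by exact_mod_cast hklt)]
    simp only [List.foldl_cons, PySem.List.pyGet?_natCast,
      List.getElem?_eq_getElem hklt, List.getElem?_eq_getElem hkt]
    have hcast : ((k : Int) + 1) = ((k + 1 : Nat) : Int) := by push_cast; ring
    rw [hcast, ih (k + 1) (by omega)]
    rw [List.drop_eq_getElem_cons hklt, List.drop_eq_getElem_cons hkt]
    rfl

theorem pvFoldRange {a : Type} (ws ts : List String) (f : a -> String × String -> a)
    (h : ws.length ≤ ts.length) (init : a) :
    (PySem.List.pyRange 0 (ws.length : Int) 1).foldl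
      (fun d i =>
        match PySem.List.pyGet? ws i, PySem.List.pyGet? ts i with
        | some w, some t => f d (w, t)
        | _, _ => d) init
    = (ws.zip ts).foldl f init := by
  have h0 := pvFoldRangeAux ws ts f h ws.length 0 (by omega) init
  simpa using h0

theorem pvGroup_cons (p : String × String) (L : List (String × String)) (w : String) :
    pvGroup (p :: L) w = if p.1 = w then p.2 :: pvGroup L w else pvGroup L w := by
  simp only [pvGroup, List.filter_cons]
  by_cases h : p.1 = w <;> simp [h]

theorem pvGet?_groupFold :
    ∀ (L : List (String × String)) (d : PySem.Dict String (List String)) (w : String),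
      (L.foldl pvStepA d).get? w =
        match d.get? w with
        | some v => some (v ++ pvGroup L w)
        | none => if pvGroup L w = [] then none else some (pvGroup L w) := by
  intro L
  induction L with
  | nil =>
    intro d w
    cases h : d.get? w <;> simp [pvGroup, h]
  | cons p L ih =>
    intro d w
    simp only [List.foldl_cons]
    rw [ih (pvStepA d p) w, pvGroup_cons]
    by_cases hw : p.1 = w
    · subst hw
      cases h : d.get? p.1 with
      | none =>
        have : (pvStepA d p).get? p.1 = some [p.2] := by
          simp [pvStepA, h, PySem.Dict.get?_insert_self]
        simp [this]
      | some v =>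
        have : (pvStepA d p).get? p.1 = some (v ++ [p.2]) := by
          simp [pvStepA, h, PySem.Dict.get?_insert_self]
        simp [this]
    · have : (pvStepA d p).get? w = d.get? w := by
        unfold pvStepA
        cases h : d.get? p.1 <;>
          simp [PySem.Dict.get?_insert_of_ne _ _ (fun he => hw he.symm)]
      rw [this]
      simp [hw]

theorem pvGet?_mapDict (l : List (String × List String)) (g : List String → String) (w : String) :
    (PySem.Dict.mk (l.map (fun kv => (kv.1, g kv.2)))).get? w
      = ((PySem.Dict.mk l).get? w).map g := by
  induction l with
  | nil => rfl
  | cons kv l ih =>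
    obtain ⟨k, v⟩ := kv
    simp only [List.map_cons, PySem.Dict.get?_mk_cons]
    by_cases h : k == w <;> simp [h, ih]

theorem pvBFold :
    ∀ (I : List ((String × String) × Int)) (b : PySem.Dict String String)
      (bc : PySem.Dict String Int) (w : String),
      (((I.foldl pvStepB (b, bc)).1.get? w), ((I.foldl pvStepB (b, bc)).2.getD w 0))
        = pvRun (I.filterMap (fun q => if q.1.1 = w then some (q.1.2, q.2) else none))
            (b.get? w, bc.getD w 0) := by
  intro I
  induction I with
  | nil => intro b bc w; rfl
  | cons q I ih =>
    intro b bc w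
    simp only [List.foldl_cons, List.filterMap_cons]
    by_cases hw : q.1.1 = w
    · simp only [hw, if_true]
      by_cases hc : q.2 > bc.getD w 0
      · have hstep : pvStepB (b, bc) q = (b.insert q.1.1 q.1.2, bc.insert q.1.1 q.2) := by
          simp [pvStepB, hw, hc]
        rw [hstep, ih]
        simp [pvRun, hw, hc, PySem.Dict.get?_insert_self]
      · have hstep : pvStepB (b, bc) q = (b, bc) := by
          simp [pvStepB, hw, hc]
        rw [hstep, ih]
        simp [pvRun, hc]
    · simp only [if_neg hw]
      by_cases hc : q.2 > bc.getD q.1.1 0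
      · have hstep : pvStepB (b, bc) q = (b.insert q.1.1 q.1.2, bc.insert q.1.1 q.2) := by
          simp [pvStepB, hc]
        rw [hstep, ih]
        rw [PySem.Dict.get?_insert_of_ne _ _ (fun he => hw he.symm),
            PySem.Dict.getD_insert, if_neg (fun he => hw he.symm)]
      · have hstep : pvStepB (b, bc) q = (b, bc) := by
          simp [pvStepB, hc]
        rw [hstep, ih]

theorem pvInsertBy_ne_nil {a : Type} (before : a → a → Bool) (x : a) (l : List a) :
    PySem.List.insertBy before x l ≠ [] := by
  cases l with
  | nil => simp [PySem.List.insertBy]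
  | cons y ys =>
    simp only [PySem.List.insertBy]
    by_cases h : before x y <;> simp [h]

theorem pvHeadInsertBy (x y : String × Int) (ys : List (String × Int)) (d : String × Int) :
    (PySem.List.insertBy (fun a b => decide ((b.2 : Int) < a.2)) x (y :: ys)).headD d
      = if x.2 > y.2 then x else y := by
  simp only [PySem.List.insertBy]
  by_cases h : y.2 < x.2
  · simp [h, gt_iff_lt]
  · simp [h, gt_iff_lt]

theorem pvHeadInsertFold :
    ∀ (l acc : List (String × Int)), acc ≠ [] → ∀ (d : String × Int),
      (l.foldl (fun acc x => PySem.List.insertBy (fun a b => decide ((b.2 : Int) < a.2)) x acc) acc).headD d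
        = pvRunH l (acc.headD d) := by
  intro l
  induction l with
  | nil => intro acc hacc d; rfl
  | cons x l ih =>
    intro acc hacc d
    obtain ⟨y, ys, rfl⟩ := List.exists_cons_of_ne_nil hacc
    simp only [List.foldl_cons]
    rw [ih _ (pvInsertBy_ne_nil _ _ _) d]
    simp only [pvRunH, List.foldl_cons, List.headD_cons]
    rw [pvHeadInsertBy x y ys d]

theorem pvRun_some :
    ∀ (l : List (String × Int)) (h : String × Int),
      pvRun l (some h.1, h.2) = (some (pvRunH l h).1, (pvRunH l h).2) := by
  intro l
  induction l with
  | nil => intro h; rfl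
  | cons x l ih =>
    intro h
    simp only [pvRun, pvRunH, List.foldl_cons]
    by_cases hc : x.2 > h.2
    · simpa [hc] using ih x
    · simpa [hc] using ih h

theorem pvFilterMapIf {a b : Type} (q : a → Prop) [DecidablePred q] (f : a → b) :
    ∀ (l : List a),
      l.filterMap (fun x => if q x then some (f x) else none)
        = (l.filter (fun x => decide (q x))).map f := by
  intro l
  induction l with
  | nil => rfl
  | cons x l ih =>
    by_cases h : q x <;> simp [h, ih]

theorem pvFilterAdd {a : Type} [BEq a] [LawfulBEq a] (p : a → Bool) (s : List a) (x : a) :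
    (PySem.Set.add s x).filter p = if p x then PySem.Set.add (s.filter p) x else s.filter p := by
  unfold PySem.Set.add
  by_cases hc : x ∈ s
  · have h2 : x ∈ s.filter p ↔ p x := by simp [List.mem_filter, hc]
    by_cases hp : p x <;> simp [hc, hp, h2]
  · have h2 : x ∉ s.filter p := fun h => hc (List.mem_of_mem_filter h)
    by_cases hp : p x <;> simp [hc, hp, h2, List.filter_append]

theorem pvMapAdd (w : String) (s : List (String × String)) (x : String × String)
    (hs : ∀ p ∈ s, p.1 = w) (hx : x.1 = w) :
    (PySem.Set.add s x).map (fun p => p.2) = PySem.Set.add (s.map (fun p => p.2)) x.2 := by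
  unfold PySem.Set.add
  have hmem : x ∈ s ↔ x.2 ∈ s.map (fun p => p.2) := by
    simp only [List.mem_map]
    constructor
    · intro h; exact ⟨x, h, rfl⟩
    · rintro ⟨q, hq, he⟩
      have hq1 : q.1 = w := hs q hq
      have : q = x := by cases q; cases x; simp_all
      rwa [← this]
  by_cases hc : x ∈ s
  · rw [if_pos ((PySem.Set.contains_iff s x).mpr hc),
        if_pos ((PySem.Set.contains_iff _ _).mpr (hmem.mp hc))]
  · rw [if_neg (fun h => hc ((PySem.Set.contains_iff s x).mp h)),
        if_neg (fun h => hc (hmem.mpr ((PySem.Set.contains_iff _ _).mp h))), List.map_append]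
    rfl

theorem pvOfListFilterAux {a : Type} [BEq a] [LawfulBEq a] (p : a → Bool) :
    ∀ (l s : List a),
      (List.foldl PySem.Set.add s l).filter p
        = List.foldl PySem.Set.add (s.filter p) (l.filter p) := by
  intro l
  induction l with
  | nil => intro s; rfl
  | cons x l ih =>
    intro s
    simp only [List.foldl_cons, List.filter_cons]
    rw [ih, pvFilterAdd]
    by_cases hp : p x <;> simp [hp]

theorem pvOfListMapSndAux (w : String) :
    ∀ (l s : List (String × String)), (∀ p ∈ l, p.1 = w) → (∀ p ∈ s, p.1 = w) →
      (List.foldl PySem.Set.add s l).map (fun p => p.2)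
        = List.foldl PySem.Set.add (s.map (fun p => p.2)) (l.map (fun p => p.2)) := by
  intro l
  induction l with
  | nil => intro s _ _; rfl
  | cons x l ih =>
    intro s hl hs
    have hx : x.1 = w := hl x (by simp)
    have hadds : ∀ q ∈ PySem.Set.add s x, q.1 = w := by
      intro q hq
      unfold PySem.Set.add at hq
      by_cases hc : PySem.Set.contains s x = true
      · rw [if_pos hc] at hq; exact hs q hq
      · rw [if_neg hc] at hq
        rcases List.mem_append.mp hq with hq | hq
        · exact hs q hq
        · rw [List.mem_singleton.mp hq]; exact hx
    simp only [List.foldl_cons, List.map_cons]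
    rw [ih _ (fun p hp => hl p (by simp [hp])) hadds, pvMapAdd w s x hs hx]

theorem pvCountPair (L : List (String × String)) (w : String) (p : String × String)
    (hp : p.1 = w) :
    L.count p = (pvGroup L w).count p.2 := by
  unfold pvGroup
  rw [← List.count_filter (p := fun q => q.1 == w) (l := L) (by simp [hp])]
  rw [List.count, List.count, List.countP_map]
  apply List.countP_congr
  intro q hq
  have hq1 : q.1 = w := by
    have := List.of_mem_filter hq
    simpa using this
  cases q; cases p
  simp_all [Function.comp]

-- the two per-word item lists coincide
theorem pvItemsEq (L : List (String × String)) (w : String) :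
    ((PySem.Dict.counter L).items).filterMap
        (fun q => if q.1.1 = w then some (q.1.2, q.2) else none)
      = (PySem.Dict.counter (pvGroup L w)).items := by
  rw [PySem.Dict.items_counter, PySem.Dict.items_counter, List.filterMap_map]
  have h1 : (PySem.Set.ofList L).filterMap
      ((fun q => if q.1.1 = w then some (q.1.2, q.2) else none) ∘
        (fun k => (k, (L.count k : Int))))
      = ((PySem.Set.ofList L).filter (fun p => decide (p.1 = w))).map
          (fun p => (p.2, (L.count p : Int))) := by
    exact pvFilterMapIf (fun p : String × String => p.1 = w)
      (fun p => (p.2, (L.count p : Int))) (PySem.Set.ofList L)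
  rw [h1]
  have h2 : (PySem.Set.ofList L).filter (fun p => decide (p.1 = w))
      = PySem.Set.ofList (L.filter (fun p => decide (p.1 = w))) := by
    exact pvOfListFilterAux _ L []
  rw [h2]
  set M := L.filter (fun p : String × String => decide (p.1 = w)) with hM
  have hMw : ∀ p ∈ M, p.1 = w := by
    intro p hp
    have := List.of_mem_filter hp
    simpa using this
  have hMem : ∀ p ∈ PySem.Set.ofList M, p.1 = w := by
    intro p hp
    exact hMw p ((PySem.Set.mem_ofList M p).mp hp)
  have h3 : (PySem.Set.ofList M).map (fun p => (p.2, (L.count p : Int)))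
      = (PySem.Set.ofList M).map
          (fun p => (p.2, ((pvGroup L w).count p.2 : Int))) := by
    apply List.map_congr_left
    intro p hp
    rw [pvCountPair L w p (hMem p hp)]
  rw [h3]
  have h4 : (PySem.Set.ofList M).map
        (fun p => (p.2, ((pvGroup L w).count p.2 : Int)))
      = ((PySem.Set.ofList M).map (fun p => p.2)).map
          (fun t => (t, ((pvGroup L w).count t : Int))) := by
    rw [List.map_map]; rfl
  rw [h4]
  have h5 : (PySem.Set.ofList M).map (fun p => p.2)
      = PySem.Set.ofList (M.map (fun p => p.2)) := by
    exact pvOfListMapSndAux w M [] hMw (by simp)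
  rw [h5]
  have h6 : M.map (fun p : String × String => p.2) = pvGroup L w := by
    unfold pvGroup
    congr 1
  rw [h6]


theorem pvPerWord (L : List (String × String)) (w : String) (hw : pvGroup L w ≠ []) :
    ((pvRun (((PySem.Dict.counter L).items).filterMap
        (fun q => if q.1.1 = w then some (q.1.2, q.2) else none)) (none, 0)).1).getD ""
      = pvMostCommonTag (pvGroup L w) := by
  rw [pvItemsEq]
  set v := pvGroup L w with hv
  have hpos : ∀ x ∈ (PySem.Dict.counter v).items, (0 : Int) < x.2 := by
    intro x hx
    rw [PySem.Dict.items_counter] at hx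
    obtain ⟨k, hk, rfl⟩ := List.mem_map.mp hx
    have hkv : k ∈ v := (PySem.Set.mem_ofList v k).mp hk
    have : 0 < v.count k := List.count_pos_iff.mpr hkv
    simpa using this
  have hne : (PySem.Dict.counter v).items ≠ [] := by
    rw [PySem.Dict.items_counter]
    intro hnil
    obtain ⟨t, ht⟩ := List.exists_mem_of_ne_nil v hw
    have : t ∈ PySem.Set.ofList v := (PySem.Set.mem_ofList v t).mpr ht
    rw [List.map_eq_nil_iff.mp hnil] at this
    exact absurd this (List.not_mem_nil)
  obtain ⟨x, xs, hxs⟩ := List.exists_cons_of_ne_nil hne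
  have hx2 : (0 : Int) < x.2 := hpos x (by rw [hxs]; simp)
  unfold pvMostCommonTag
  rw [PySem.List.sorted_rev_eq_foldl_insertBy, hxs]
  simp only [List.foldl_cons]
  have hins : PySem.List.insertBy (fun a b => decide ((b.2 : Int) < a.2)) x ([] : List (String × Int)) = [x] := by
    simp [PySem.List.insertBy]
  rw [hins, pvHeadInsertFold xs [x] (by simp) ("", 0)]
  have hrun : pvRun (x :: xs) (none, 0) = (some (pvRunH xs x).1, (pvRunH xs x).2) := by
    unfold pvRun
    rw [List.foldl_cons]
    have : ((0 : Int) < x.2) = True := by simp [hx2]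
    simp only [gt_iff_lt, hx2, if_pos]
    exact pvRun_some xs x
  rw [hrun]
  rfl

theorem pvGroup_ne_nil (words tags : List String) (hpre : words.length ≤ tags.length)
    (w : String) (hw : w ∈ words) : pvGroup (words.zip tags) w ≠ [] := by
  rcases List.mem_iff_getElem.mp hw with ⟨i, hi, rfl⟩
  have hit : i < tags.length := lt_of_lt_of_le hi hpre
  have hmem : (words[i], tags[i]) ∈ words.zip tags := by
    have hz : i < (words.zip tags).length := by
      rw [List.length_zip]; omega
    have : (words.zip tags)[i] = (words[i], tags[i]) := List.getElem_zip
    rw [← this]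
    exact List.getElem_mem hz
  apply List.ne_nil_of_mem (a := tags[i])
  unfold pvGroup
  apply List.mem_map.mpr
  refine ⟨(words[i], tags[i]), ?_, rfl⟩
  apply List.mem_filter.mpr
  exact ⟨hmem, by simp⟩

theorem selectMostLikely_spec : Claim_equal_selectMostLikely := by
  intro words tags _ hpre
  unfold Spec_selectMostLikely
  simp only [selectMostLikely, selectMostLikely_alt]
  rw [PySem.List.foldl_append_singleton_eq_map, List.nil_append]
  -- A's first loop over range(len(words)) is the pair fold over zip words tags
  have hfold :
      (PySem.List.pyRange 0 (words.length : Int) 1).foldl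
        (fun d i =>
          match PySem.List.pyGet? words i, PySem.List.pyGet? tags i with
          | some w, some t =>
            match d.get? w with
            | none => d.insert w [t]
            | some v => d.insert w (v ++ [t])
          | _, _ => d)
        PySem.Dict.empty
      = (words.zip tags).foldl pvStepA PySem.Dict.empty :=
    pvFoldRange words tags pvStepA hpre PySem.Dict.empty
  rw [hfold]
  apply List.map_congr_left
  intro w hw
  have hgr := pvGroup_ne_nil words tags hpre w hw
  -- A's per-word value
  have hA : (PySem.Dict.mk
        (((words.zip tags).foldl pvStepA PySem.Dict.empty).items.map
          (fun kv => (kv.1, pvMostCommonTag kv.2)))).getD w ""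
      = pvMostCommonTag (pvGroup (words.zip tags) w) := by
    unfold PySem.Dict.getD
    rw [pvGet?_mapDict]
    have hmk : (PySem.Dict.mk ((words.zip tags).foldl pvStepA PySem.Dict.empty).items)
        = (words.zip tags).foldl pvStepA PySem.Dict.empty := rfl
    rw [hmk, pvGet?_groupFold]
    have hemp : (PySem.Dict.empty : PySem.Dict String (List String)).get? w = none := rfl
    rw [hemp]
    simp [hgr]
  rw [hA]
  -- B's per-word value
  have hB := pvBFold ((PySem.Dict.counter (words.zip tags)).items)
      PySem.Dict.empty PySem.Dict.empty w
  have hB1 := congrArg Prod.fst hB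
  simp only at hB1
  have hstep : (fun (st : PySem.Dict String String × PySem.Dict String Int) kv =>
      if kv.2 > st.2.getD kv.1.1 0 then (st.1.insert kv.1.1 kv.1.2, st.2.insert kv.1.1 kv.2)
      else st) = pvStepB := rfl
  rw [hstep]
  have hgetD : ∀ (d : PySem.Dict String String), d.getD w "" = (d.get? w).getD "" :=
    fun _ => rfl
  rw [hgetD, hB1]
  exact (pvPerWord (words.zip tags) w hgr).symm
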